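-- pv_equiv track=rewrite | github.com/shenyangHuang/TGB | modules/timetraveler_dirichlet.py | get_entity_occ_times
-- ===== SOURCE A (Python) =====
-- def get_entity_occ_times(trainQuads):
--     entity_occ_times = {}  # key -> entity, value -> dict [key: time, value: times]
--     for quad in trainQuads:
--         for entity in [quad[0], quad[2]]:
--             if entity in entity_occ_times.keys():
--                 if quad[3] in entity_occ_times[entity].keys():
--                     entity_occ_times[entity][quad[3]] += 1
--                 else:
--                     entity_occ_times[entity][quad[3]] = 1
--             else:
--                 entity_occ_times[entity] = {quad[3]: 1, }
--     return entity_occ_times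
-- ===== SOURCE B (Python) =====
-- def get_entity_occ_times(trainQuads):
--     # Pass 1: flat counter keyed by (entity, time).
--     flat = {}
--     for quad in trainQuads:
--         for entity in (quad[0], quad[2]):
--             key = (entity, quad[3])
--             flat[key] = flat.get(key, 0) + 1
--     # Pass 2: pivot the flat table into the nested dict.
--     result = {}
--     for (entity, time), count in flat.items():
--         result.setdefault(entity, {})[time] = count
--     return result
-- ===== Notes on version B (the rewrite author's own statement) =====
-- stated objective: alternative
-- what changed: A builds the nested {entity: {time: count}} dict in one live-nesting pass with per-element branching on both dict levels; B first builds a flat counter keyed by (entity, time) tuples and then pivots the flat table into the nested dict in a separate regrouping pass.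
import Mathlib
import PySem

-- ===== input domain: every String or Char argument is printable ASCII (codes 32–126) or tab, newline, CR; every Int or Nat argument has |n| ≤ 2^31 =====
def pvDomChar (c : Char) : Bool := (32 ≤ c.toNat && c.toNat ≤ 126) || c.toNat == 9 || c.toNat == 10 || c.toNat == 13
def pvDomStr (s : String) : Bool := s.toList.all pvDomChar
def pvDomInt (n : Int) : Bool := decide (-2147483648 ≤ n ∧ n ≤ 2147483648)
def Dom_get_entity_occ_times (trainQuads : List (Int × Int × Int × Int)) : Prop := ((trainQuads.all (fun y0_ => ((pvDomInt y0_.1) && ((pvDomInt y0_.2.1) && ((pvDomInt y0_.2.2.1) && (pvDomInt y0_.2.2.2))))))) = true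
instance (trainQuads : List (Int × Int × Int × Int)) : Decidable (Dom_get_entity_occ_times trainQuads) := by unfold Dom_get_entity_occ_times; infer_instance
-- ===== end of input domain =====

-- B replaces A's single live-nesting pass by a flat (entity,time) counter pass plus a pivot
-- pass that regroups the flat table into the nested dict (objective: alternative decomposition).
-- Python dicts are ported as association lists in insertion order (update first match in place,
-- append new keys at the end) — exact for the get/set/in/setdefault operations both programs use;
-- the output type is the raw nested list, so the dict operations are ported by hand below.

-- shared assoc-list primitives (exact models of Python dict `in`, `d[k]`/`d.get`, in-place update)
def hasKey {κ α : Type} [DecidableEq κ] (k : κ) : List (κ × α) → Bool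
  | [] => false
  | (a, _) :: rest => a = k || hasKey k rest

def lookupD {κ α : Type} [DecidableEq κ] (k : κ) : List (κ × α) → α → α
  | [], d => d
  | (a, b) :: rest, d => if a = k then b else lookupD k rest d

def modFirst {κ α : Type} [DecidableEq κ] (k : κ) (f : α → α) : List (κ × α) → List (κ × α)
  | [] => []
  | (a, b) :: rest => if a = k then (a, f b) :: rest else (a, b) :: modFirst k f rest

-- `d[k] = v`: overwrite in place if present, else append
def setItem {κ α : Type} [DecidableEq κ] (l : List (κ × α)) (k : κ) (v : α) : List (κ × α) :=
  if hasKey k l then modFirst k (fun _ => v) l else l ++ [(k, v)]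

-- ===== PORT A =====
-- one `for entity in [quad[0], quad[2]]` body of A
def stepA (d : List (Int × List (Int × Int))) (e t : Int) : List (Int × List (Int × Int)) :=
  if hasKey e d then
    if hasKey t (lookupD e d []) then
      modFirst e (fun inner => modFirst t (fun n => n + 1) inner) d
    else
      modFirst e (fun inner => inner ++ [(t, 1)]) d
  else d ++ [(e, [(t, 1)])]

def get_entity_occ_times (trainQuads : List (Int × Int × Int × Int)) : List (Int × List (Int × Int)) :=
  trainQuads.foldl (fun d q => [q.1, q.2.2.1].foldl (fun d e => stepA d e q.2.2.2) d) []

-- ===== PORT B =====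
-- `flat[key] = flat.get(key, 0) + 1`
def bump (c : List ((Int × Int) × Int)) (k : Int × Int) : List ((Int × Int) × Int) :=
  setItem c k (lookupD k c 0 + 1)

-- `result.setdefault(entity, {})[time] = count`
def pivotStep (r : List (Int × List (Int × Int))) (x : (Int × Int) × Int) : List (Int × List (Int × Int)) :=
  let r' := if hasKey x.1.1 r then r else r ++ [(x.1.1, [])]
  modFirst x.1.1 (fun inner => setItem inner x.1.2 x.2) r'

def get_entity_occ_times_alt (trainQuads : List (Int × Int × Int × Int)) : List (Int × List (Int × Int)) :=
  (trainQuads.foldl (fun c q => bump (bump c (q.1, q.2.2.2)) (q.2.2.1, q.2.2.2)) []).foldl pivotStep []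

-- ===== PRECONDITION & SPEC =====
def Spec_get_entity_occ_times (trainQuads : List (Int × Int × Int × Int)) (out : List (Int × List (Int × Int))) : Prop := out = get_entity_occ_times_alt trainQuads
instance (trainQuads : List (Int × Int × Int × Int)) (out : List (Int × List (Int × Int))) : Decidable (Spec_get_entity_occ_times trainQuads out) := by unfold Spec_get_entity_occ_times; infer_instance

-- ===== CLAIM (what is proved, stated in full; the proofs are below) =====
def Claim_equal_get_entity_occ_times : Prop := ∀ (trainQuads : List (Int × Int × Int × Int)), Dom_get_entity_occ_times trainQuads → Spec_get_entity_occ_times trainQuads (get_entity_occ_times trainQuads)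

-- ===== LEMMAS AND PROOFS =====

theorem keys_modFirst {κ α : Type} [DecidableEq κ] (k : κ) (f : α → α) (l : List (κ × α)) :
    (modFirst k f l).map Prod.fst = l.map Prod.fst := by
  induction l with
  | nil => rfl
  | cons p rest ih =>
    obtain ⟨a, b⟩ := p
    by_cases h : a = k <;> simp [modFirst, h, ih]

theorem hasKey_iff_mem {κ α : Type} [DecidableEq κ] (k : κ) (l : List (κ × α)) :
    hasKey k l = true ↔ k ∈ l.map Prod.fst := by
  induction l with
  | nil => simp [hasKey]
  | cons p rest ih =>
    obtain ⟨a, b⟩ := p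
    simp only [hasKey, Bool.or_eq_true, decide_eq_true_eq, List.map_cons, List.mem_cons, ih]
    constructor
    · rintro (h | h)
      · exact Or.inl h.symm
      · exact Or.inr h
    · rintro (h | h)
      · exact Or.inl h.symm
      · exact Or.inr h

theorem hasKey_modFirst {κ α : Type} [DecidableEq κ] (k k' : κ) (f : α → α) (l : List (κ × α)) :
    hasKey k' (modFirst k f l) = hasKey k' l := by
  cases h : hasKey k' l
  · cases h' : hasKey k' (modFirst k f l)
    · rfl
    · exfalso
      rw [hasKey_iff_mem, keys_modFirst] at h'
      rw [← hasKey_iff_mem] at h'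
      simp [h'] at h
  · rw [hasKey_iff_mem, keys_modFirst, ← hasKey_iff_mem]; exact h

theorem hasKey_append {κ α : Type} [DecidableEq κ] (k : κ) (l l' : List (κ × α)) :
    hasKey k (l ++ l') = (hasKey k l || hasKey k l') := by
  induction l with
  | nil => simp [hasKey]
  | cons p rest ih =>
    obtain ⟨a, b⟩ := p
    by_cases h : a = k <;> simp [hasKey, h, ih]

theorem modFirst_append_left {κ α : Type} [DecidableEq κ] (k : κ) (f : α → α) (l l' : List (κ × α))
    (h : hasKey k l = true) : modFirst k f (l ++ l') = modFirst k f l ++ l' := by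
  induction l with
  | nil => simp [hasKey] at h
  | cons p rest ih =>
    obtain ⟨a, b⟩ := p
    by_cases ha : a = k
    · simp [modFirst, ha]
    · simp [hasKey, ha] at h
      simp [modFirst, ha, ih h]

theorem modFirst_append_right {κ α : Type} [DecidableEq κ] (k : κ) (f : α → α) (l l' : List (κ × α))
    (h : hasKey k l = false) : modFirst k f (l ++ l') = l ++ modFirst k f l' := by
  induction l with
  | nil => simp
  | cons p rest ih =>
    obtain ⟨a, b⟩ := p
    simp [hasKey] at h
    simp [modFirst, h.1, ih h.2]

theorem modFirst_comm_ne {κ α : Type} [DecidableEq κ] (k k' : κ) (f g : α → α) (l : List (κ × α))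
    (h : k ≠ k') : modFirst k f (modFirst k' g l) = modFirst k' g (modFirst k f l) := by
  induction l with
  | nil => rfl
  | cons p rest ih =>
    obtain ⟨a, b⟩ := p
    by_cases ha : a = k
    · have ha' : ¬ a = k' := fun hc => h (ha ▸ hc ▸ rfl)
      simp [modFirst, ha, h]
    · by_cases ha' : a = k'
      · simp [modFirst, ha', Ne.symm h]
      · simp [modFirst, ha, ha', ih]

theorem modFirst_modFirst {κ α : Type} [DecidableEq κ] (k : κ) (f g : α → α) (l : List (κ × α)) :
    modFirst k f (modFirst k g l) = modFirst k (fun x => f (g x)) l := by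
  induction l with
  | nil => rfl
  | cons p rest ih =>
    obtain ⟨a, b⟩ := p
    by_cases ha : a = k <;> simp [modFirst, ha, ih]

theorem lookupD_modFirst_self {κ α : Type} [DecidableEq κ] (k : κ) (f : α → α) (l : List (κ × α))
    (d : α) (h : hasKey k l = true) : lookupD k (modFirst k f l) d = f (lookupD k l d) := by
  induction l with
  | nil => simp [hasKey] at h
  | cons p rest ih =>
    obtain ⟨a, b⟩ := p
    by_cases ha : a = k
    · simp [modFirst, lookupD, ha]
    · simp [hasKey, ha] at h
      simp [modFirst, lookupD, ha, ih h]

theorem lookupD_modFirst_ne {κ α : Type} [DecidableEq κ] (k k' : κ) (f : α → α) (l : List (κ × α))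
    (d : α) (h : k ≠ k') : lookupD k (modFirst k' f l) d = lookupD k l d := by
  induction l with
  | nil => rfl
  | cons p rest ih =>
    obtain ⟨a, b⟩ := p
    by_cases ha : a = k'
    · have ha' : ¬ a = k := fun hc => h (hc ▸ ha ▸ rfl)
      simp [modFirst, lookupD, ha, Ne.symm h]
    · by_cases ha' : a = k <;> simp [modFirst, lookupD, ha, ha', ih, h]

theorem modFirst_congr {κ α : Type} [DecidableEq κ] (k : κ) (f g : α → α) (l : List (κ × α))
    (d : α) (h : f (lookupD k l d) = g (lookupD k l d)) : modFirst k f l = modFirst k g l := by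
  induction l with
  | nil => rfl
  | cons p rest ih =>
    obtain ⟨a, b⟩ := p
    by_cases ha : a = k
    · simp [lookupD, ha] at h
      simp [modFirst, ha, h]
    · simp [lookupD, ha] at h
      simp [modFirst, ha, ih h]

theorem lookupD_of_not_hasKey {κ α : Type} [DecidableEq κ] (k : κ) (l : List (κ × α)) (d : α)
    (h : hasKey k l = false) : lookupD k l d = d := by
  induction l with
  | nil => rfl
  | cons p rest ih =>
    obtain ⟨a, b⟩ := p
    simp [hasKey] at h
    simp [lookupD, h.1, ih h.2]

theorem lookupD_append {κ α : Type} [DecidableEq κ] (k : κ) (l l' : List (κ × α)) (d : α) :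
    lookupD k (l ++ l') d = if hasKey k l then lookupD k l d else lookupD k l' d := by
  induction l with
  | nil => simp [hasKey]
  | cons p rest ih =>
    obtain ⟨a, b⟩ := p
    by_cases ha : a = k
    · simp [hasKey, lookupD, ha]
    · simp [hasKey, lookupD, ha, ih]

theorem hasKey_setItem {κ α : Type} [DecidableEq κ] (k k' : κ) (l : List (κ × α)) (v : α) :
    hasKey k' (setItem l k v) = (hasKey k' l || decide (k' = k)) := by
  unfold setItem
  by_cases h : hasKey k l
  · rw [if_pos h, hasKey_modFirst]
    by_cases hk : k' = k
    · simp [hk, h]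
    · simp [hk]
  · simp only [if_neg h, hasKey_append]
    by_cases hk : k' = k
    · simp [hasKey, hk]
    · have hk' : ¬ k = k' := fun hc => hk hc.symm
      simp [hasKey, hk, hk']

-- after the incr of slot (e,t), the inner list of the PRESENT slot evolves the same way
theorem setItem_succ {t : Int} (v : List (Int × Int)) (n : Int) :
    modFirst t (fun m => m + 1) (setItem v t n) = setItem v t (n + 1) := by
  by_cases h : hasKey t v
  · simp only [setItem, if_pos h, modFirst_modFirst]
  · simp only [setItem, if_neg (by simp [h] : ¬ hasKey t v = true)]
    rw [modFirst_append_right _ _ _ _ (by simp [h])]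
    simp [modFirst]
  
-- the two inner-dict updates at distinct times commute
theorem setItem_comm_succ (v : List (Int × Int)) (t t' n' : Int) (htt : t' ≠ t)
    (ht : hasKey t v = true) :
    setItem (modFirst t (fun m => m + 1) v) t' n' =
      modFirst t (fun m => m + 1) (setItem v t' n') := by
  unfold setItem
  rw [hasKey_modFirst]
  by_cases h3 : hasKey t' v
  · rw [if_pos h3, if_pos h3]
    exact modFirst_comm_ne t' t _ _ v htt
  · rw [if_neg h3, if_neg h3]
    exact (modFirst_append_left t _ v [(t', n')] ht).symm

-- step-level characterisation of pivotStep
theorem lookupD_pivotStep_self (r : List (Int × List (Int × Int))) (e t : Int) (n : Int) :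
    lookupD e (pivotStep r ((e, t), n)) [] = setItem (lookupD e r []) t n := by
  unfold pivotStep
  by_cases h : hasKey e r
  · simp only [if_pos h]
    exact lookupD_modFirst_self e _ r [] h
  · simp only [if_neg h]
    rw [lookupD_modFirst_self e _ _ [] (by simp [hasKey_append, hasKey])]
    rw [lookupD_append, if_neg (by simp [h])]
    simp [lookupD, lookupD_of_not_hasKey e r [] (by simp [h])]

theorem lookupD_pivotStep_ne (r : List (Int × List (Int × Int))) (e : Int) (x : (Int × Int) × Int)
    (h : e ≠ x.1.1) : lookupD e (pivotStep r x) [] = lookupD e r [] := by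
  unfold pivotStep
  by_cases hk : hasKey x.1.1 r
  · simp only [if_pos hk]
    exact lookupD_modFirst_ne _ _ _ _ _ h
  · simp only [if_neg hk]
    rw [lookupD_modFirst_ne _ _ _ _ _ h, lookupD_append]
    by_cases he : hasKey e r
    · simp [he]
    · simp [he, lookupD, lookupD_of_not_hasKey e r [] (by simp [he])]

theorem hasKey_pivotStep (r : List (Int × List (Int × Int))) (e : Int) (x : (Int × Int) × Int) :
    hasKey e (pivotStep r x) = (hasKey e r || decide (e = x.1.1)) := by
  unfold pivotStep
  by_cases hk : hasKey x.1.1 r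
  · simp only [if_pos hk, hasKey_modFirst]
    by_cases he : e = x.1.1
    · simp [he, hk]
    · simp [he]
  · simp only [if_neg hk, hasKey_modFirst, hasKey_append]
    by_cases he : e = x.1.1 <;> simp [hasKey, he, eq_comm]

-- inner-membership characterisation of the whole pivot fold
theorem hasKey_inner_pivot (c : List ((Int × Int) × Int)) :
    ∀ (r : List (Int × List (Int × Int))) (e t : Int),
      hasKey t (lookupD e (List.foldl pivotStep r c) []) =
        (hasKey t (lookupD e r []) || hasKey (e, t) c) := by
  induction c with
  | nil => intro r e t; simp [hasKey]
  | cons x rest ih =>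
    intro r e t
    obtain ⟨⟨e', t'⟩, n'⟩ := x
    simp only [List.foldl_cons]
    rw [ih]
    by_cases he : e = e'
    · subst he
      rw [lookupD_pivotStep_self, hasKey_setItem]
      by_cases ht : t = t' <;> simp [hasKey, ht, eq_comm]
    · rw [lookupD_pivotStep_ne _ _ _ (by simpa using he)]
      have : ¬ ((e', t') = (e, t)) := fun hc => he (congrArg Prod.fst hc).symm
      simp [hasKey, this]

-- outer-membership characterisation of the whole pivot fold
theorem hasKey_outer_pivot (c : List ((Int × Int) × Int)) :
    ∀ (r : List (Int × List (Int × Int))) (e : Int),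
      hasKey e (List.foldl pivotStep r c) = (hasKey e r || c.any (fun x => x.1.1 = e)) := by
  induction c with
  | nil => intro r e; simp
  | cons x rest ih =>
    intro r e
    simp only [List.foldl_cons, List.any_cons]
    rw [ih, hasKey_pivotStep]
    by_cases he : e = x.1.1 <;> simp [he, eq_comm]

-- incrementing slot (e,t) of the flat table commutes with one pivot step
theorem pivotStep_succ (r : List (Int × List (Int × Int))) (e t : Int) (n : Int) :
    pivotStep r ((e, t), n + 1) =
      modFirst e (modFirst t (fun m => m + 1)) (pivotStep r ((e, t), n)) := by
  unfold pivotStep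
  have key : ∀ (r' : List (Int × List (Int × Int))),
      modFirst e (fun inner => setItem inner t (n + 1)) r' =
        modFirst e (modFirst t (fun m => m + 1)) (modFirst e (fun inner => setItem inner t n) r') := by
    intro r'
    rw [modFirst_modFirst]
    have : (fun inner => setItem inner t (n + 1)) =
        (fun inner => modFirst t (fun m => m + 1) (setItem inner t n)) := by
      funext v; rw [setItem_succ]
    rw [this]
  by_cases h : hasKey e r <;> simp only [if_pos, h, key]

-- incrementing an already-present slot commutes with the rest of the pivot fold
theorem pivot_bumpSlot (e t : Int) (L : List ((Int × Int) × Int)) :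
    ∀ (r : List (Int × List (Int × Int))),
      hasKey e r = true → hasKey t (lookupD e r []) = true → hasKey (e, t) L = false →
      List.foldl pivotStep (modFirst e (modFirst t (fun m => m + 1)) r) L =
        modFirst e (modFirst t (fun m => m + 1)) (List.foldl pivotStep r L) := by
  induction L with
  | nil => intro r _ _ _; rfl
  | cons x rest ih =>
    intro r he ht hL
    obtain ⟨⟨e', t'⟩, n'⟩ := x
    simp only [hasKey, Bool.or_eq_false_iff] at hL
    have hne : ¬ ((e', t') = (e, t)) := of_decide_eq_false hL.1
    simp only [List.foldl_cons]
    have step : pivotStep (modFirst e (modFirst t (fun m => m + 1)) r) ((e', t'), n') =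
        modFirst e (modFirst t (fun m => m + 1)) (pivotStep r ((e', t'), n')) := by
      by_cases hee : e' = e
      · subst hee
        have htt : t' ≠ t := fun hc => hne (by rw [hc])
        simp only [pivotStep, hasKey_modFirst, if_pos he]
        rw [modFirst_modFirst, modFirst_modFirst]
        apply modFirst_congr _ _ _ _ []
        exact setItem_comm_succ _ _ _ _ htt ht
      · simp only [pivotStep, hasKey_modFirst]
        by_cases hk : hasKey e' r
        · simp only [if_pos hk]
          exact modFirst_comm_ne e' e _ _ r hee
        · simp only [if_neg hk]
          rw [modFirst_append_right e' _ _ [(e', [])] (by rw [hasKey_modFirst]; simpa using hk),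
            modFirst_append_right e' _ r [(e', [])] (by simpa using hk),
            modFirst_append_left e _ r _ he]
    rw [step]
    apply ih
    · rw [hasKey_pivotStep]; simp [he]
    · by_cases hee : e = e'
      · subst hee
        rw [lookupD_pivotStep_self, hasKey_setItem]
        simp [ht]
      · rw [lookupD_pivotStep_ne _ _ _ (by simpa using hee)]
        exact ht
    · exact hL.2

-- pivoting the flat table with slot (e,t) incremented = A's increment branch on the pivoted table
theorem pivot_modFirst (e t : Int) (c : List ((Int × Int) × Int)) :
    ∀ (r : List (Int × List (Int × Int))),
      (c.map Prod.fst).Nodup → hasKey (e, t) c = true →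
      List.foldl pivotStep r (modFirst (e, t) (fun m => m + 1) c) =
        modFirst e (modFirst t (fun m => m + 1)) (List.foldl pivotStep r c) := by
  induction c with
  | nil => intro r _ h; simp [hasKey] at h
  | cons x rest ih =>
    intro r hnd hk
    obtain ⟨⟨e', t'⟩, n'⟩ := x
    simp only [List.map_cons, List.nodup_cons] at hnd
    by_cases hx : (e', t') = (e, t)
    · have he : e' = e := congrArg Prod.fst hx
      have ht0 : t' = t := congrArg Prod.snd hx
      subst he; subst ht0
      simp only [modFirst, if_true]
      simp only [List.foldl_cons]
      rw [pivotStep_succ]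
      apply pivot_bumpSlot
      · rw [hasKey_pivotStep]; simp
      · rw [lookupD_pivotStep_self, hasKey_setItem]; simp
      · cases h : hasKey (e', t') rest
        · rfl
        · exact absurd ((hasKey_iff_mem _ _).mp h) hnd.1
    · simp only [modFirst, if_neg hx, List.foldl_cons]
      simp only [hasKey, Bool.or_eq_true] at hk
      rcases hk with hk | hk
      · exact absurd (of_decide_eq_true hk) hx
      · exact ih _ hnd.2 hk

-- a fresh (entity,time) slot pivoted at the end = A's append branches
theorem pivotStep_fresh (P : List (Int × List (Int × Int))) (e t : Int)
    (hti : hasKey t (lookupD e P []) = false) :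
    pivotStep P ((e, t), 1) = stepA P e t := by
  unfold pivotStep stepA
  by_cases he : hasKey e P
  · rw [if_pos he, if_pos he, if_neg (by simp [hti])]
    apply modFirst_congr _ _ _ _ []
    simp only [setItem]
    rw [if_neg (by simp [hti])]
  · rw [if_neg he, if_neg he, modFirst_append_right _ _ _ _ (by simpa using he)]
    simp [modFirst, setItem, hasKey]

-- the central bridging lemma: one bump on the flat side = one stepA on the nested side
theorem pivot_bump (c : List ((Int × Int) × Int)) (e t : Int)
    (hnd : (c.map Prod.fst).Nodup) :
    List.foldl pivotStep [] (bump c (e, t)) = stepA (List.foldl pivotStep [] c) e t := by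
  have houter : hasKey e (List.foldl pivotStep [] c) = c.any (fun x => x.1.1 = e) := by
    rw [hasKey_outer_pivot]; simp [hasKey]
  have hinner : hasKey t (lookupD e (List.foldl pivotStep [] c) []) = hasKey (e, t) c := by
    rw [hasKey_inner_pivot]; simp [lookupD, hasKey]
  by_cases h : hasKey (e, t) c
  · have hbump : bump c (e, t) = modFirst (e, t) (fun m => m + 1) c := by
      unfold bump setItem
      rw [if_pos h]
      exact modFirst_congr _ _ _ _ 0 rfl
    have hout : hasKey e (List.foldl pivotStep [] c) = true := by
      rw [houter]
      have := (hasKey_iff_mem _ _).mp h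
      simp only [List.mem_map] at this
      obtain ⟨⟨⟨e0, t0⟩, n0⟩, hmem, hfst⟩ := this
      simp only [List.any_eq_true]
      exact ⟨_, hmem, by simp [show e0 = e from congrArg Prod.fst hfst]⟩
    rw [hbump, pivot_modFirst e t c [] hnd h]
    unfold stepA
    rw [if_pos hout, if_pos (by rw [hinner]; exact h)]
  · have hbump : bump c (e, t) = c ++ [((e, t), 1)] := by
      unfold bump setItem
      rw [if_neg (by simp [h]), lookupD_of_not_hasKey _ _ _ (by simp [h])]
      norm_num
    rw [hbump, List.foldl_append]
    simp only [List.foldl_cons, List.foldl_nil]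
    exact pivotStep_fresh _ e t (by rw [hinner]; simpa using h)

theorem bump_nodup (c : List ((Int × Int) × Int)) (k : Int × Int)
    (hnd : (c.map Prod.fst).Nodup) : ((bump c k).map Prod.fst).Nodup := by
  unfold bump setItem
  by_cases h : hasKey k c
  · rw [if_pos h, keys_modFirst]; exact hnd
  · rw [if_neg h]
    have hk : k ∉ c.map Prod.fst := fun hm => absurd ((hasKey_iff_mem _ _).mpr hm) (by simp [h])
    simp only [List.nodup_append, List.map_append, List.map_cons, List.map_nil]
    exact ⟨hnd, List.nodup_singleton _,
      fun a ha b hb he => hk ((he.trans (List.mem_singleton.mp hb)) ▸ ha)⟩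

-- the invariant carried through the quad loop
theorem pivot_fold (quads : List (Int × Int × Int × Int)) :
    ∀ (c : List ((Int × Int) × Int)), (c.map Prod.fst).Nodup →
      List.foldl pivotStep []
          (List.foldl (fun c q => bump (bump c (q.1, q.2.2.2)) (q.2.2.1, q.2.2.2)) c quads) =
        List.foldl (fun d q => [q.1, q.2.2.1].foldl (fun d e => stepA d e q.2.2.2) d)
          (List.foldl pivotStep [] c) quads := by
  induction quads with
  | nil => intro c _; rfl
  | cons q rest ih =>
    intro c hnd
    rw [List.foldl_cons, List.foldl_cons,
      ih _ (bump_nodup _ _ (bump_nodup _ _ hnd)),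
      pivot_bump _ _ _ (bump_nodup _ _ hnd), pivot_bump _ _ _ hnd]
    rfl

-- ===== VERDICT (by name: the statement is the Claim_ definition above) =====
theorem get_entity_occ_times_spec : Claim_equal_get_entity_occ_times := by
  intro trainQuads _
  unfold Spec_get_entity_occ_times get_entity_occ_times get_entity_occ_times_alt
  exact (pivot_fold trainQuads [] (by simp)).symm
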